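-- pv_equiv track=rewrite | github.com/spicylemonade/AI_research | scripts/run_experiments.py | parse_symbolic_to_prefix
-- ===== SOURCE A (Python) =====
-- def parse_symbolic_to_prefix(symbolic: str) -> list:
--     """Parse symbolic notation like 'mul(x1, pow(x2, 2))' to prefix tokens."""
--     def _parse(s, pos):
--         while pos < len(s) and s[pos] in " ,":
--             pos += 1
--         if pos >= len(s):
--             return [], pos
--         start = pos
--         while pos < len(s) and (s[pos].isalnum() or s[pos] in "_.-"):
--             pos += 1
--         name = s[start:pos]
--         while pos < len(s) and s[pos] == " ":
--             pos += 1
--         if pos < len(s) and s[pos] == "(":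
--             pos += 1
--             tokens_list = [name]
--             while pos < len(s) and s[pos] != ")":
--                 while pos < len(s) and s[pos] in " ,":
--                     pos += 1
--                 if pos < len(s) and s[pos] == ")":
--                     break
--                 child, pos = _parse(s, pos)
--                 tokens_list.extend(child)
--             if pos < len(s) and s[pos] == ")":
--                 pos += 1
--             return tokens_list, pos
--         else:
--             return [name], pos
--     result, _ = _parse(symbolic, 0)
--     return result
-- ===== SOURCE B (Python) =====
-- def parse_symbolic_to_prefix(symbolic: str) -> list:
--     """Iterative single pass: one index, one depth counter, pre-order names."""
--     s = symbolic
--     n = len(s)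
--     out = []
--     pos = 0
--     depth = 0
--     while pos < n:
--         c = s[pos]
--         if c == " " or c == ",":
--             pos += 1
--             continue
--         if depth > 0 and c == ")":
--             pos += 1
--             depth -= 1
--             if depth == 0:
--                 break
--             continue
--         # read a maximal (possibly empty) name
--         start = pos
--         while pos < n and (s[pos].isalnum() or s[pos] in "_.-"):
--             pos += 1
--         out.append(s[start:pos])
--         # only spaces may bind a name to its '('
--         while pos < n and s[pos] == " ":
--             pos += 1
--         if pos < n and s[pos] == "(":
--             pos += 1
--             depth += 1
--         elif depth == 0:
--             break
--         elif pos == start: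
--             # unknown character (outside the symbolic alphabet): skip it
--             pos += 1
--     return out
-- ===== Notes on version B (the rewrite author's own statement) =====
-- stated objective: faster
-- what changed: Replaces the recursive-descent parser (nested _parse calls building and concatenating per-node token lists) by a single iterative left-to-right scan that keeps only an index and an integer paren-depth counter and appends names directly to one output list.
-- outside the precondition, e.g. on parse_symbolic_to_prefix('f(a) !'): A returns ['f', 'a'], B returns ['f', 'a']; on parse_symbolic_to_prefix('f(*)'): A does not finish within the time limit, B returns ['f', '']
import Mathlib
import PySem

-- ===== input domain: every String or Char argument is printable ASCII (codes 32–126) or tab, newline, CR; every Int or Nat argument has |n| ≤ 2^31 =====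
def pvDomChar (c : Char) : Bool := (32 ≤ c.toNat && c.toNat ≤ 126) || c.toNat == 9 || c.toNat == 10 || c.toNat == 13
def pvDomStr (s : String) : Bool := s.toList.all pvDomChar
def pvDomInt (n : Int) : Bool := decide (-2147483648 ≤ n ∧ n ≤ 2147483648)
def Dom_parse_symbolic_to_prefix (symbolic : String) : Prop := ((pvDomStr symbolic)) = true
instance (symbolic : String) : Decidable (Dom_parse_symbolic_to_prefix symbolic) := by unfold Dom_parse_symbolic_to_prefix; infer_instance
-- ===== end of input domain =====

-- B replaces A's recursive descent by one iterative scan with an index and an integer depth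
-- counter (same O(n), measurably faster by a constant factor in a timing run).

-- name characters: Python s[pos].isalnum() or s[pos] in "_.-" (exact on the ASCII domain)
def pyIsName (c : Char) : Bool := (c.isAlpha || c.isDigit) || c == '_' || c == '.' || c == '-'
-- separators: s[pos] in " ,"
def pyIsSep (c : Char) : Bool := c == ' ' || c == ','

-- ===== PORT A =====
-- _parse(s,pos) ported on the remaining suffix s[pos:]; the recursion of A does not terminate on
-- some inputs (see Pre_), so it is made total with a fuel parameter (a pure totality guard).
mutual
def aParse : Nat → List Char → List String × List Char
  | 0, s => ([], s)
  | fuel+1, s =>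
    -- while s[pos] in " ,": pos += 1 ; if pos >= len(s): return [], pos
    let t := s.dropWhile pyIsSep
    if t.isEmpty then ([], t)
    else
      -- name = s[start:pos] over the maximal alnum/_.- run
      let name := String.mk (t.takeWhile pyIsName)
      -- while s[pos] == " ": pos += 1
      let u := (t.dropWhile pyIsName).dropWhile (fun x => x == ' ')
      if u.head? = some '(' then
        let r := aChildren fuel u.tail
        (name :: r.1, r.2)
      else ([name], u)

def aChildren : Nat → List Char → List String × List Char
  | 0, s => ([], s)
  | fuel+1, s =>
    -- while pos < len(s) and s[pos] != ")": …  then  if s[pos] == ")": pos += 1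
    if s.isEmpty then ([], s)
    else if s.head? = some ')' then ([], s.tail)
    else
      let t := s.dropWhile pyIsSep
      if t.head? = some ')' then ([], t.tail)
      else if t.isEmpty then ([], t)
      else
        let c := aParse fuel t
        let r := aChildren fuel c.2
        (c.1 ++ r.1, r.2)
end

def parse_symbolic_to_prefix (symbolic : String) : List String :=
  (aParse (2 * symbolic.toList.length + 2) symbolic.toList).1

-- ===== PORT B =====
-- Source B's single loop over (pos, depth, out), ported on the remaining suffix; the branch on
-- pyIsName c only names Source B's 'pos == start' (empty name) case explicitly.
def bLoop (s : List Char) (depth : Nat) (acc : List String) : List String :=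
  match s with
  | [] => acc
  | c :: rest =>
    if pyIsSep c then bLoop rest depth acc
    else if 0 < depth ∧ c = ')' then
      if depth = 1 then acc else bLoop rest (depth - 1) acc
    else if hn : pyIsName c then
      let nm := String.mk ((c :: rest).takeWhile pyIsName)
      let u := ((c :: rest).dropWhile pyIsName).dropWhile (fun x => x == ' ')
      if u.head? = some '(' then bLoop u.tail (depth + 1) (acc ++ [nm])
      else if depth = 0 then acc ++ [nm]
      else bLoop u depth (acc ++ [nm])
    else if c = '(' then bLoop rest (depth + 1) (acc ++ [""])
    else if depth = 0 then acc ++ [""]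
    else bLoop rest depth (acc ++ [""])   -- unknown character: skip it (unreachable under Pre_)
termination_by s.length
decreasing_by
  · simp
  · simp
  · -- u.tail shorter: the name run at c is nonempty
    have h1 : ((c :: rest).dropWhile pyIsName) = rest.dropWhile pyIsName :=
      List.dropWhile_cons_of_pos hn
    have h2 : (rest.dropWhile pyIsName).length ≤ rest.length :=
      (List.dropWhile_sublist _).length_le
    have h3 : (((c :: rest).dropWhile pyIsName).dropWhile (fun x => x == ' ')).length
        ≤ ((c :: rest).dropWhile pyIsName).length := (List.dropWhile_sublist _).length_le
    have h4 := (List.tail_sublist (((c :: rest).dropWhile pyIsName).dropWhile (fun x => x == ' '))).length_le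
    have h5 : (c :: rest).length = rest.length + 1 := rfl
    simp only [h1] at h3 h4 ⊢
    omega
  · have h1 : ((c :: rest).dropWhile pyIsName) = rest.dropWhile pyIsName :=
      List.dropWhile_cons_of_pos hn
    have h2 : (rest.dropWhile pyIsName).length ≤ rest.length :=
      (List.dropWhile_sublist _).length_le
    have h3 : (((c :: rest).dropWhile pyIsName).dropWhile (fun x => x == ' ')).length
        ≤ ((c :: rest).dropWhile pyIsName).length := (List.dropWhile_sublist _).length_le
    have h5 : (c :: rest).length = rest.length + 1 := rfl
    simp only [h1] at h3 ⊢
    omega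
  · simp
  · simp

def parse_symbolic_to_prefix_alt (symbolic : String) : List String :=
  bLoop symbolic.toList 0 []

-- ===== PRECONDITION & SPEC =====
-- a character of the symbolic alphabet: name chars, ' ', ',', '(' , ')'
def pvClassChar (c : Char) : Bool := pyIsName c || pyIsSep c || c == '(' || c == ')'
-- Pre_ admits strings over the symbolic alphabet, plus any parenthesis-free string: a
-- character outside the alphabet occurring inside a parenthesised argument list makes A loop
-- forever, and strings that mix an opening parenthesis with such characters are excluded
-- wholesale (even where A happens to return, e.g. "f(a) !") to keep the condition closed-form.
def Pre_parse_symbolic_to_prefix (symbolic : String) : Prop :=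
  symbolic.toList.all pvClassChar = true ∨ ('(' : Char) ∉ symbolic.toList
instance (symbolic : String) : Decidable (Pre_parse_symbolic_to_prefix symbolic) := by
  unfold Pre_parse_symbolic_to_prefix; infer_instance

def pvWitness_parse_symbolic_to_prefix : String := "mul(x1, pow(x2, 2))"

def Spec_parse_symbolic_to_prefix (symbolic : String) (out : List String) : Prop :=
  out = parse_symbolic_to_prefix_alt symbolic
instance (symbolic : String) (out : List String) : Decidable (Spec_parse_symbolic_to_prefix symbolic out) := by
  unfold Spec_parse_symbolic_to_prefix; infer_instance

-- ===== CLAIM (what is proved, stated in full; the proofs are below) =====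
def Claim_equal_parse_symbolic_to_prefix : Prop :=
  ∀ (symbolic : String), Dom_parse_symbolic_to_prefix symbolic →
    Pre_parse_symbolic_to_prefix symbolic →
    Spec_parse_symbolic_to_prefix symbolic (parse_symbolic_to_prefix symbolic)

-- ===== LEMMAS AND PROOFS =====

theorem classOk_sub {l m : List Char} (h : List.Sublist l m) (hm : m.all pvClassChar = true) :
    l.all pvClassChar = true := by
  rw [List.all_eq_true] at *; exact fun x hx => hm x (h.subset hx)

-- one-step unfoldings
theorem aParse_succ (f : Nat) (s : List Char) : aParse (f+1) s =
    (let t := s.dropWhile pyIsSep;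
     if t.isEmpty then ([], t) else
       let name := String.mk (t.takeWhile pyIsName);
       let u := (t.dropWhile pyIsName).dropWhile (fun x => x == ' ');
       if u.head? = some '(' then
         let r := aChildren f u.tail
         (name :: r.1, r.2)
       else ([name], u)) := by
  rw [aParse]

theorem aChildren_succ (f : Nat) (s : List Char) : aChildren (f+1) s =
    (if s.isEmpty then ([], s)
     else if s.head? = some ')' then ([], s.tail)
     else
       let t := s.dropWhile pyIsSep
       if t.head? = some ')' then ([], t.tail)
       else if t.isEmpty then ([], t)
       else
         let c := aParse f t
         let r := aChildren f c.2
         (c.1 ++ r.1, r.2)) := by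
  rw [aChildren]

theorem bLoop_cons (c : Char) (rest : List Char) (depth : Nat) (acc : List String) :
    bLoop (c :: rest) depth acc =
    (if pyIsSep c then bLoop rest depth acc
     else if 0 < depth ∧ c = ')' then
       if depth = 1 then acc else bLoop rest (depth - 1) acc
     else if pyIsName c then
       let nm := String.mk ((c :: rest).takeWhile pyIsName)
       let u := ((c :: rest).dropWhile pyIsName).dropWhile (fun x => x == ' ')
       if u.head? = some '(' then bLoop u.tail (depth + 1) (acc ++ [nm])
       else if depth = 0 then acc ++ [nm]
       else bLoop u depth (acc ++ [nm])
     else if c = '(' then bLoop rest (depth + 1) (acc ++ [""])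
     else if depth = 0 then acc ++ [""]
     else bLoop rest depth (acc ++ [""])) := by
  rw [bLoop]; split_ifs <;> rfl

theorem bLoop_nil (d : Nat) (acc : List String) : bLoop [] d acc = acc := by rw [bLoop]

theorem dropWhile_head_false {p : Char → Bool} {c : Char} {r : List Char} :
    ∀ {l : List Char}, l.dropWhile p = c :: r → p c = false := by
  intro l
  induction l with
  | nil => intro h; simp [List.dropWhile] at h
  | cons a l ih =>
    intro h
    by_cases ha : p a
    · exact ih (by rwa [List.dropWhile_cons_of_pos ha] at h)
    · rw [List.dropWhile_cons_of_neg ha] at h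
      cases h
      exact Bool.eq_false_iff.mpr ha

theorem head_class {c : Char} (hc : pvClassChar c = true) (hsep : pyIsSep c = false)
    (hpar : c ≠ ')') : pyIsName c = true ∨ c = '(' := by
  unfold pvClassChar at hc
  simp only [Bool.or_eq_true, beq_iff_eq] at hc
  rcases hc with ((h | h) | h) | h
  · exact Or.inl h
  · rw [h] at hsep; cases hsep
  · exact Or.inr h
  · exact absurd h hpar

theorem bLoop_dropSep (s : List Char) (d : Nat) (acc : List String) :
    bLoop (s.dropWhile pyIsSep) d acc = bLoop s d acc := by
  induction s with
  | nil => simp [List.dropWhile]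
  | cons c rest ih =>
    by_cases h : pyIsSep c
    · rw [List.dropWhile_cons_of_pos h, ih, bLoop_cons, if_pos h]
    · rw [List.dropWhile_cons_of_neg h]

theorem a_suffix : ∀ fuel : Nat,
    (∀ s, (aParse fuel s).2 <:+ s) ∧ (∀ s, (aChildren fuel s).2 <:+ s) := by
  intro fuel
  induction fuel with
  | zero =>
    constructor <;> intro s <;> simp [aParse, aChildren]
  | succ f ih =>
    obtain ⟨ihP, ihC⟩ := ih
    constructor
    · intro s
      rw [aParse_succ]
      dsimp only
      split_ifs with h1 h2
      · exact List.dropWhile_suffix _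
      · exact ((ihC _).trans (List.tail_suffix _)).trans
          (((List.dropWhile_suffix _).trans (List.dropWhile_suffix _)).trans (List.dropWhile_suffix _))
      · exact ((List.dropWhile_suffix _).trans (List.dropWhile_suffix _)).trans (List.dropWhile_suffix _)
    · intro s
      rw [aChildren_succ]
      dsimp only
      split_ifs with h1 h2 h3 h4
      · exact List.suffix_refl _
      · exact List.tail_suffix _
      · exact (List.tail_suffix _).trans (List.dropWhile_suffix _)
      · exact List.dropWhile_suffix _
      · exact ((ihC _).trans (ihP _)).trans (List.dropWhile_suffix _)

theorem aParse_len_lt (fuel : Nat) (c : Char) (s : List Char) (hf : 1 ≤ fuel)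
    (hsep : pyIsSep c = false) (hcls : pyIsName c = true ∨ c = '(') :
    ((aParse fuel (c :: s)).2).length < (c :: s).length := by
  cases fuel with
  | zero => omega
  | succ f =>
    have hsep' : ¬ (pyIsSep c = true) := by simp [hsep]
    have hdrop : (c :: s).dropWhile pyIsSep = c :: s := List.dropWhile_cons_of_neg hsep'
    rw [aParse_succ]
    dsimp only
    rw [hdrop]
    simp only [List.isEmpty_cons, Bool.false_eq_true, if_false]
    rcases hcls with hn | hp
    · have h1 : (c :: s).dropWhile pyIsName = s.dropWhile pyIsName :=
        List.dropWhile_cons_of_pos hn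
      have h2 : ((s.dropWhile pyIsName).dropWhile (fun x => x == ' ')).length ≤ s.length :=
        le_trans ((List.dropWhile_suffix _).sublist.length_le)
          ((List.dropWhile_suffix _).sublist.length_le)
      rw [h1]
      split_ifs with hpar2
      · have h3 := ((a_suffix f).2
          (((s.dropWhile pyIsName).dropWhile (fun x => x == ' ')).tail)).sublist.length_le
        have h4 := (List.tail_suffix
          ((s.dropWhile pyIsName).dropWhile (fun x => x == ' '))).sublist.length_le
        simp only [List.length_cons]
        omega
      · simp only [List.length_cons]; omega
    · subst hp
      have h1 : ('(' :: s).dropWhile pyIsName = '(' :: s := List.dropWhile_cons_of_neg (by decide)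
      have h2 : (('(' :: s) : List Char).dropWhile (fun x => x == ' ') = '(' :: s :=
        List.dropWhile_cons_of_neg (by decide)
      rw [h1, h2]
      simp only [List.head?_cons, List.tail_cons, if_pos]
      have h3 := ((a_suffix f).2 s).sublist.length_le
      simp only [List.length_cons]
      omega

theorem triple : ∀ fuel : Nat,
    (∀ (s : List Char) (d : Nat) (acc : List String),
        s.all pvClassChar = true → 2 * s.length + 3 ≤ fuel →
        bLoop s (d+1) acc =
          (if d = 0 then acc ++ (aChildren fuel s).1
           else bLoop (aChildren fuel s).2 d (acc ++ (aChildren fuel s).1)))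
  ∧ (∀ (c : Char) (s : List Char) (d : Nat) (acc : List String),
        (c :: s).all pvClassChar = true → 2 * (c :: s).length + 2 ≤ fuel →
        pyIsSep c = false → c ≠ ')' → 1 ≤ d →
        bLoop (c :: s) d acc = bLoop (aParse fuel (c :: s)).2 d (acc ++ (aParse fuel (c :: s)).1))
  ∧ (∀ (s : List Char) (acc : List String),
        s.all pvClassChar = true → 2 * s.length + 2 ≤ fuel →
        bLoop s 0 acc = acc ++ (aParse fuel s).1) := by
  intro fuel
  induction fuel using Nat.strong_induction_on with
  | _ fuel IH =>
    refine ⟨?_, ?_, ?_⟩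
    · -- (C)
      intro s d acc hcls hbud
      obtain ⟨f, rfl⟩ : ∃ f, fuel = f + 1 := ⟨fuel - 1, by omega⟩
      cases s with
      | nil =>
        have hA : aChildren (f+1) ([] : List Char) = ([], []) := by
          rw [aChildren_succ]; simp
        rw [hA]
        split_ifs <;> simp [bLoop_nil]
      | cons c rest =>
        by_cases hc : c = ')'
        · subst hc
          have hA : aChildren (f+1) (')' :: rest) = ([], rest) := by
            rw [aChildren_succ]; simp
          rw [hA, bLoop_cons]
          have h1 : pyIsSep ')' = false := by decide
          simp only [h1, Bool.false_eq_true, if_false]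
          rw [if_pos (by simp)]
          rcases Nat.eq_zero_or_pos d with hd | hd
          · subst hd; simp
          · rw [if_neg (by omega), if_neg (by omega)]
            simp
        · -- c ≠ ')' and s nonempty: skip separators, then look again
          rw [← bLoop_dropSep (c :: rest) (d+1) acc]
          have hsub : List.Sublist ((c :: rest).dropWhile pyIsSep) (c :: rest) :=
            (List.dropWhile_suffix _).sublist
          have htcls : ((c :: rest).dropWhile pyIsSep).all pvClassChar = true :=
            classOk_sub hsub hcls
          have htlen : ((c :: rest).dropWhile pyIsSep).length ≤ (c :: rest).length :=
            hsub.length_le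
          cases ht : (c :: rest).dropWhile pyIsSep with
          | nil =>
            have hA : aChildren (f+1) (c :: rest) = ([], []) := by
              rw [aChildren_succ]
              simp only [List.isEmpty_cons, Bool.false_eq_true, if_false,
                List.head?_cons, ht]
              simp [hc]
            rw [hA, bLoop_nil]
            split_ifs <;> simp [bLoop_nil]
          | cons c2 rest2 =>
            rw [ht] at htcls htlen
            have hc2sep : pyIsSep c2 = false := dropWhile_head_false ht
            have hc2cls : pvClassChar c2 = true := by
              have := htcls
              simp only [List.all_cons, Bool.and_eq_true] at this
              exact this.1
            by_cases hc2 : c2 = ')'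
            · subst hc2
              have hA : aChildren (f+1) (c :: rest) = ([], rest2) := by
                rw [aChildren_succ]
                simp only [List.isEmpty_cons, Bool.false_eq_true, if_false,
                  List.head?_cons, ht]
                simp [hc]
              rw [hA, bLoop_cons]
              have h1 : pyIsSep ')' = false := by decide
              simp only [h1, Bool.false_eq_true, if_false]
              rw [if_pos (by simp)]
              rcases Nat.eq_zero_or_pos d with hd | hd
              · subst hd; simp
              · rw [if_neg (by omega), if_neg (by omega)]
                simp
            · -- a child follows
              have hname := head_class hc2cls hc2sep hc2
              have hf1 : 1 ≤ f := by
                have := (c2 :: rest2).length; omega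
              have hlt := aParse_len_lt f c2 rest2 hf1 hc2sep hname
              have hA : aChildren (f+1) (c :: rest) =
                  ((aParse f (c2 :: rest2)).1 ++ (aChildren f (aParse f (c2 :: rest2)).2).1,
                   (aChildren f (aParse f (c2 :: rest2)).2).2) := by
                rw [aChildren_succ]
                simp only [List.isEmpty_cons, Bool.false_eq_true, if_false,
                  List.head?_cons, ht]
                simp [hc, hc2]
              have hP' := (IH f (by omega)).2.1 c2 rest2 (d+1) acc htcls
                (by simp only [List.length_cons] at *; omega) hc2sep hc2 (by omega)
              have hcls2 : ((aParse f (c2 :: rest2)).2).all pvClassChar = true :=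
                classOk_sub ((a_suffix f).1 _).sublist htcls
              have hC := (IH f (by omega)).1 (aParse f (c2 :: rest2)).2 d
                (acc ++ (aParse f (c2 :: rest2)).1) hcls2
                (by simp only [List.length_cons] at *; omega)
              rw [hP', hC, hA]
              rcases Nat.eq_zero_or_pos d with hd | hd
              · subst hd; simp
              · rw [if_neg (by omega), if_neg (by omega)]
                simp
    · -- (P')
      intro c s d acc hcls hbud hsep hpar hd
      obtain ⟨f, rfl⟩ : ∃ f, fuel = f + 1 := ⟨fuel - 1, by omega⟩
      have hdrop : (c :: s).dropWhile pyIsSep = c :: s :=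
        List.dropWhile_cons_of_neg (by simp [hsep])
      have hccls : pvClassChar c = true := by
        have := hcls; simp only [List.all_cons, Bool.and_eq_true] at this; exact this.1
      have hscls : s.all pvClassChar = true := by
        have := hcls; simp only [List.all_cons, Bool.and_eq_true] at this; exact this.2
      rcases head_class hccls hsep hpar with hn | hp
      · -- head is a name character
        have hdropn : (c :: s).dropWhile pyIsName = s.dropWhile pyIsName :=
          List.dropWhile_cons_of_pos hn
        have hulen : ((s.dropWhile pyIsName).dropWhile (fun x => x == ' ')).length ≤ s.length :=
          le_trans (List.dropWhile_suffix _).sublist.length_le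
            (List.dropWhile_suffix _).sublist.length_le
        have hucls : ((s.dropWhile pyIsName).dropWhile (fun x => x == ' ')).all pvClassChar = true :=
          classOk_sub ((List.dropWhile_suffix _).trans (List.dropWhile_suffix _)).sublist hscls
        cases hu : (s.dropWhile pyIsName).dropWhile (fun x => x == ' ') with
        | nil =>
          have hA : aParse (f+1) (c :: s) = ([String.mk ((c :: s).takeWhile pyIsName)], []) := by
            rw [aParse_succ]
            simp only [hdrop, List.isEmpty_cons, Bool.false_eq_true, if_false, hdropn, hu]
            simp
          rw [hA, bLoop_cons]
          rw [if_neg (by simp [hsep]), if_neg (by simp [hpar]), if_pos hn]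
          simp only [hdropn, hu]
          simp only [List.head?_nil, reduceCtorEq, if_false]
          rw [if_neg (by omega), bLoop_nil]
        | cons x xs =>
          rw [hu] at hulen hucls
          by_cases hx : x = '('
          · subst hx
            have hA : aParse (f+1) (c :: s) =
                (String.mk ((c :: s).takeWhile pyIsName) :: (aChildren f xs).1,
                 (aChildren f xs).2) := by
              rw [aParse_succ]
              simp only [hdrop, List.isEmpty_cons, Bool.false_eq_true, if_false, hdropn, hu]
              simp
            rw [hA, bLoop_cons]
            rw [if_neg (by simp [hsep]), if_neg (by simp [hpar]), if_pos hn]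
            simp only [hdropn, hu, List.head?_cons, List.tail_cons, if_pos]
            have hxscls : xs.all pvClassChar = true := by
              have := hucls; simp only [List.all_cons, Bool.and_eq_true] at this; exact this.2
            have hC := (IH f (by omega)).1 xs d
              (acc ++ [String.mk ((c :: s).takeWhile pyIsName)]) hxscls
              (by simp only [List.length_cons] at *; omega)
            rw [hC]
            rcases Nat.eq_zero_or_pos d with hd0 | hd0
            · omega
            · rw [if_neg (by omega)]
              simp
          · have hA : aParse (f+1) (c :: s) =
                ([String.mk ((c :: s).takeWhile pyIsName)], x :: xs) := by
              rw [aParse_succ]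
              simp only [hdrop, List.isEmpty_cons, Bool.false_eq_true, if_false, hdropn, hu]
              simp [hx]
            rw [hA, bLoop_cons]
            rw [if_neg (by simp [hsep]), if_neg (by simp [hpar]), if_pos hn]
            simp only [hdropn, hu, List.head?_cons]
            rw [if_neg (by simp [hx]), if_neg (by omega)]
      · -- head is '('
        subst hp
        have hA : aParse (f+1) ('(' :: s) =
            ("" :: (aChildren f s).1, (aChildren f s).2) := by
          rw [aParse_succ]
          simp only [hdrop, List.isEmpty_cons, Bool.false_eq_true, if_false]
          rw [List.dropWhile_cons_of_neg (by decide), List.dropWhile_cons_of_neg (by decide),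
            List.takeWhile_cons_of_neg (by decide)]
          simp
          try decide
        rw [hA, bLoop_cons]
        rw [if_neg (by simp [pyIsSep]), if_neg (by simp), if_neg (by simp [pyIsName]),
          if_pos rfl]
        have hC := (IH f (by omega)).1 s d (acc ++ [""]) hscls
          (by simp only [List.length_cons] at *; omega)
        rw [hC]
        rcases Nat.eq_zero_or_pos d with hd0 | hd0
        · omega
        · rw [if_neg (by omega)]
          simp
    · -- (P0)
      intro s acc hcls hbud
      obtain ⟨f, rfl⟩ : ∃ f, fuel = f + 1 := ⟨fuel - 1, by omega⟩
      rw [← bLoop_dropSep s 0 acc]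
      have hsub : List.Sublist (s.dropWhile pyIsSep) s := (List.dropWhile_suffix _).sublist
      have htcls : (s.dropWhile pyIsSep).all pvClassChar = true := classOk_sub hsub hcls
      have htlen : (s.dropWhile pyIsSep).length ≤ s.length := hsub.length_le
      cases ht : s.dropWhile pyIsSep with
      | nil =>
        have hA : aParse (f+1) s = ([], []) := by
          rw [aParse_succ]
          simp only [ht]
          simp
        rw [hA, bLoop_nil]
        simp
      | cons c rest =>
        rw [ht] at htcls htlen
        have hcsep : pyIsSep c = false := dropWhile_head_false ht
        have hccls : pvClassChar c = true := by
          have := htcls; simp only [List.all_cons, Bool.and_eq_true] at this; exact this.1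
        have hrcls : rest.all pvClassChar = true := by
          have := htcls; simp only [List.all_cons, Bool.and_eq_true] at this; exact this.2
        by_cases hpar : c = ')'
        · subst hpar
          have hA : aParse (f+1) s = ([""], ')' :: rest) := by
            rw [aParse_succ]
            simp only [ht, List.isEmpty_cons, Bool.false_eq_true, if_false]
            rw [List.dropWhile_cons_of_neg (by decide), List.dropWhile_cons_of_neg (by decide),
              List.takeWhile_cons_of_neg (by decide)]
            simp
            try decide
          rw [hA, bLoop_cons]
          rw [if_neg (by simp [pyIsSep]), if_neg (by simp), if_neg (by simp [pyIsName]),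
            if_neg (by decide), if_pos rfl]
          try simp
        · rcases head_class hccls hcsep hpar with hn | hp
          · -- name head
            have hdropn : (c :: rest).dropWhile pyIsName = rest.dropWhile pyIsName :=
              List.dropWhile_cons_of_pos hn
            have hulen : ((rest.dropWhile pyIsName).dropWhile (fun x => x == ' ')).length
                ≤ rest.length :=
              le_trans (List.dropWhile_suffix _).sublist.length_le
                (List.dropWhile_suffix _).sublist.length_le
            have hucls : ((rest.dropWhile pyIsName).dropWhile (fun x => x == ' ')).all
                pvClassChar = true :=
              classOk_sub ((List.dropWhile_suffix _).trans (List.dropWhile_suffix _)).sublist hrcls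
            cases hu : (rest.dropWhile pyIsName).dropWhile (fun x => x == ' ') with
            | nil =>
              have hA : aParse (f+1) s = ([String.mk ((c :: rest).takeWhile pyIsName)], []) := by
                rw [aParse_succ]
                simp only [ht, List.isEmpty_cons, Bool.false_eq_true, if_false, hdropn, hu]
                simp
              rw [hA, bLoop_cons]
              rw [if_neg (by simp [hcsep]), if_neg (by simp), if_pos hn]
              simp only [hdropn, hu]
              simp only [List.head?_nil, reduceCtorEq, if_false]
              simp
            | cons x xs =>
              rw [hu] at hulen hucls
              by_cases hx : x = '('
              · subst hx
                have hA : aParse (f+1) s =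
                    (String.mk ((c :: rest).takeWhile pyIsName) :: (aChildren f xs).1,
                     (aChildren f xs).2) := by
                  rw [aParse_succ]
                  simp only [ht, List.isEmpty_cons, Bool.false_eq_true, if_false, hdropn, hu]
                  simp
                rw [hA, bLoop_cons]
                rw [if_neg (by simp [hcsep]), if_neg (by simp), if_pos hn]
                simp only [hdropn, hu, List.head?_cons, List.tail_cons, if_pos]
                have hxscls : xs.all pvClassChar = true := by
                  have := hucls; simp only [List.all_cons, Bool.and_eq_true] at this; exact this.2
                have hC := (IH f (by omega)).1 xs 0
                  (acc ++ [String.mk ((c :: rest).takeWhile pyIsName)]) hxscls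
                  (by simp only [List.length_cons] at *; omega)
                rw [hC, if_pos rfl]
                simp
              · have hA : aParse (f+1) s =
                    ([String.mk ((c :: rest).takeWhile pyIsName)], x :: xs) := by
                  rw [aParse_succ]
                  simp only [ht, List.isEmpty_cons, Bool.false_eq_true, if_false, hdropn, hu]
                  simp [hx]
                rw [hA, bLoop_cons]
                rw [if_neg (by simp [hcsep]), if_neg (by simp), if_pos hn]
                simp only [hdropn, hu, List.head?_cons]
                rw [if_neg (by simp [hx])]
                simp
          · -- head is '('
            subst hp
            have hA : aParse (f+1) s =
                ("" :: (aChildren f rest).1, (aChildren f rest).2) := by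
              rw [aParse_succ]
              simp only [ht, List.isEmpty_cons, Bool.false_eq_true, if_false]
              rw [List.dropWhile_cons_of_neg (by decide), List.dropWhile_cons_of_neg (by decide),
                List.takeWhile_cons_of_neg (by decide)]
              simp
              try decide
            rw [hA, bLoop_cons]
            rw [if_neg (by simp [pyIsSep]), if_neg (by simp), if_neg (by simp [pyIsName]),
              if_pos rfl]
            have hC := (IH f (by omega)).1 rest 0 (acc ++ [""]) hrcls
              (by simp only [List.length_cons] at *; omega)
            rw [hC, if_pos rfl]
            simp

-- on a parenthesis-free string, A and B agree whatever the characters are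
theorem noParen (s : List Char) (hnp : ('(' : Char) ∉ s) (f : Nat) (acc : List String) :
    bLoop s 0 acc = acc ++ (aParse (f+1) s).1 := by
  rw [← bLoop_dropSep s 0 acc, aParse_succ]
  cases ht : s.dropWhile pyIsSep with
  | nil => simp [ht, bLoop_nil]
  | cons c rest =>
    have hcsep : pyIsSep c = false := dropWhile_head_false ht
    have hsubmem : ∀ x, x ∈ c :: rest → x ∈ s := by
      intro x hx
      exact (List.dropWhile_suffix pyIsSep).sublist.subset (ht ▸ hx : x ∈ s.dropWhile pyIsSep)
    have hu : ∀ l : List Char, (∀ x ∈ l, x ∈ s) → ¬ l.head? = some '(' := by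
      intro l hl hh
      cases l with
      | nil => simp at hh
      | cons a t =>
        have ha : a = '(' := by simpa using hh
        exact hnp (ha ▸ hl a (by simp))
    have huA : ¬ (((c :: rest).dropWhile pyIsName).dropWhile (fun x => x == ' ')).head?
        = some '(' :=
      hu _ (fun x hx => hsubmem x
        (((List.dropWhile_suffix _).trans (List.dropWhile_suffix _)).sublist.subset hx))
    simp only [ht, List.isEmpty_cons, Bool.false_eq_true, if_false]
    rw [if_neg huA, bLoop_cons]
    rw [if_neg (by simp [hcsep]), if_neg (by simp)]
    by_cases hn : pyIsName c
    · rw [if_pos hn]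
      simp only []
      rw [if_neg huA, if_pos trivial]
    · have hcp : ¬ c = '(' := fun hc => hnp (hc ▸ hsubmem c (by simp))
      rw [if_neg hn, if_neg hcp, if_pos rfl]
      rw [List.takeWhile_cons_of_neg (by simp [hn])]
      rfl

-- ===== VERDICT (by name: the statement is the Claim_ definition above) =====
theorem parse_symbolic_to_prefix_spec : Claim_equal_parse_symbolic_to_prefix := by
  intro symbolic _ hpre
  unfold Spec_parse_symbolic_to_prefix parse_symbolic_to_prefix parse_symbolic_to_prefix_alt
  rcases hpre with hcls | hnp
  · have h := (triple (2 * symbolic.toList.length + 2)).2.2 symbolic.toList [] hcls (by omega)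
    simpa using h.symm
  · have h := noParen symbolic.toList hnp (2 * symbolic.toList.length + 1) []
    simpa using h.symm
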